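-- pv_equiv track=rewrite | github.com/rajatarun/TeamWeave | src/orchestrator/trigger_handler.py | _is_agent_mgmt_route
-- ===== SOURCE A (Python) =====
-- def _is_agent_mgmt_route(path: str) -> bool:
--     if not path:
--         return False
--     parts = [p for p in path.split("/") if p]
--     if not parts:
--         return False
--     if parts[0] not in {"agents", "teams", "roles", "departments"}:
--         return False
--     return len(parts) <= 2
-- ===== SOURCE B (Python) =====
-- def _is_agent_mgmt_route(path: str) -> bool:
--     # Single forward scan via lstrip/partition instead of split-filter-index.
--     s = path.lstrip("/")
--     first, _, rest = s.partition("/")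
--     if first not in ("agents", "teams", "roles", "departments"):
--         return False
--     _second, _, rest2 = rest.lstrip("/").partition("/")
--     return rest2.lstrip("/") == ""
-- ===== Notes on version B (the rewrite author's own statement) =====
-- stated objective: idiomatic
-- what changed: Replaced the split-into-list / filter-empties / index-and-count pipeline with a single forward scan using lstrip and partition that never builds a list of parts.
import Mathlib
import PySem

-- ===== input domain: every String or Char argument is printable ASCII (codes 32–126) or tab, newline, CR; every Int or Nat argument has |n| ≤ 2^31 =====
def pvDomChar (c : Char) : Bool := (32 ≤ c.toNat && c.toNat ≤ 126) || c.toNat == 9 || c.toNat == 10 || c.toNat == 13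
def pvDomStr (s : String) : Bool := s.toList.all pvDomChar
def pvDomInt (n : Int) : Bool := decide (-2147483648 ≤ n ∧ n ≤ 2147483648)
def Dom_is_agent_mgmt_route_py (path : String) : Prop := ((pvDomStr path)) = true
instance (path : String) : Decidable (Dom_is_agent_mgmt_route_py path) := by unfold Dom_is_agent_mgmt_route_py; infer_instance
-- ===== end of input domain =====

-- B replaces A's split/filter/index pipeline by a single forward lstrip/partition scan; same O(n) cost, no parts list.


-- ===== PORT A =====
-- the set literal {"agents", "teams", "roles", "departments"}
def pvMgmtWords : List (List Char) :=
  ["agents".toList, "teams".toList, "roles".toList, "departments".toList]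

def is_agent_mgmt_route_py (path : String) : Bool :=
  let cs := path.toList
  if cs = [] then false                                          -- if not path: return False
  else
    let parts := (PySem.Chars.splitOn cs ['/']).filter (fun p => decide (p ≠ []))  -- [p for p in path.split("/") if p]
    if parts = [] then false                                     -- if not parts: return False
    else if ¬ (parts.headD [] ∈ pvMgmtWords) then false          -- if parts[0] not in {...}: return False
    else decide (parts.length ≤ 2)                               -- return len(parts) <= 2

-- ===== PORT B =====
def is_agent_mgmt_route_py_alt (path : String) : Bool :=
  let s := path.toList.dropWhile (· = '/')                       -- s = path.lstrip("/")
  let first := s.takeWhile (· ≠ '/')                             -- first, _, rest = s.partition("/")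
  let rest := (s.dropWhile (· ≠ '/')).drop 1
  if ¬ (first ∈ pvMgmtWords) then false                          -- if first not in (...): return False
  else
    let r := rest.dropWhile (· = '/')                            -- rest.lstrip("/")
    let rest2 := (r.dropWhile (· ≠ '/')).drop 1                  -- _second, _, rest2 = (...).partition("/")
    (rest2.dropWhile (· = '/')) = []                             -- return rest2.lstrip("/") == ""

-- ===== PRECONDITION & SPEC =====
def Spec_is_agent_mgmt_route_py (path : String) (out : Bool) : Prop := out = is_agent_mgmt_route_py_alt path
instance (path : String) (out : Bool) : Decidable (Spec_is_agent_mgmt_route_py path out) := by unfold Spec_is_agent_mgmt_route_py; infer_instance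

-- ===== CLAIM (what is proved, stated in full; the proofs are below) =====
def Claim_equal_is_agent_mgmt_route_py : Prop := ∀ (path : String), Dom_is_agent_mgmt_route_py path → Spec_is_agent_mgmt_route_py path (is_agent_mgmt_route_py path)

-- ===== LEMMAS AND PROOFS =====

-- fuel-free model of Python's split on "/"
def pvSplitSl : List Char → List (List Char)
  | [] => [[]]
  | c :: t =>
    if c = '/' then [] :: pvSplitSl t
    else
      match pvSplitSl t with
      | [] => [[c]]
      | w :: ws => (c :: w) :: ws

lemma pvSplitSl_cons_slash (t : List Char) : pvSplitSl ('/' :: t) = [] :: pvSplitSl t := by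
  simp [pvSplitSl]

lemma pvSplitSl_ne_nil (l : List Char) : pvSplitSl l ≠ [] := by
  cases l with
  | nil => simp [pvSplitSl]
  | cons c t =>
    simp only [pvSplitSl]
    split_ifs
    · simp
    · cases h : pvSplitSl t <;> simp

def pvConsHead (p : List Char) : List (List Char) → List (List Char)
  | [] => [p]
  | w :: ws => (p ++ w) :: ws

lemma pvSplitSl_cons_ne (c : Char) (t : List Char) (hc : ¬ c = '/') :
    pvSplitSl (c :: t) = pvConsHead [c] (pvSplitSl t) := by
  simp only [pvSplitSl, if_neg hc]
  cases hs : pvSplitSl t with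
  | nil => exact absurd hs (pvSplitSl_ne_nil t)
  | cons w ws => simp [pvConsHead]

lemma go_spec : ∀ (fuel : Nat) (l cur : List Char) (acc : List (List Char)),
    l.length ≤ fuel →
    PySem.Chars.splitOn.go ['/'] fuel l cur acc
      = acc.reverse ++ pvConsHead cur.reverse (pvSplitSl l) := by
  intro fuel
  induction fuel with
  | zero =>
    intro l cur acc h
    have hl : l = [] := by cases l <;> simp_all
    subst hl
    simp [PySem.Chars.splitOn.go, pvSplitSl, pvConsHead]
  | succ n ih =>
    intro l cur acc h
    cases l with
    | nil =>
      rw [PySem.Chars.splitOn.go]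
      · simp [pvSplitSl, pvConsHead]
      · omega
    | cons c t =>
      rw [PySem.Chars.splitOn.go]
      by_cases hc : c = '/'
      · subst hc
        simp only [List.length_cons] at h
        simp only [if_pos (by simp [List.isPrefixOf] : List.isPrefixOf ['/'] ('/' :: t) = true)]
        rw [show List.drop ['/'].length ('/' :: t) = t from rfl]
        rw [ih t [] (cur.reverse :: acc) (by omega)]
        cases hs : pvSplitSl t with
        | nil => exact absurd hs (pvSplitSl_ne_nil t)
        | cons w ws => simp [pvSplitSl_cons_slash, pvConsHead, hs]
      · have hpre : List.isPrefixOf ['/'] (c :: t) = false := by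
          simp only [List.isPrefixOf, Bool.and_eq_false_iff]
          left
          simpa using fun h => hc h.symm
        rw [if_neg (by simp [hpre])]
        simp only [List.length_cons] at h
        rw [ih t (c :: cur) acc (by omega)]
        rw [pvSplitSl_cons_ne c t hc]
        cases hs : pvSplitSl t with
        | nil => exact absurd hs (pvSplitSl_ne_nil t)
        | cons w ws => simp [pvConsHead]

lemma splitOn_eq_pvSplitSl (cs : List Char) :
    PySem.Chars.splitOn cs ['/'] = pvSplitSl cs := by
  unfold PySem.Chars.splitOn
  rw [go_spec (cs.length + 1) cs [] [] (by omega)]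
  cases hs : pvSplitSl cs with
  | nil => exact absurd hs (pvSplitSl_ne_nil cs)
  | cons w ws => simp [pvConsHead]

-- the nonempty parts of cs, as B traverses them
def pvWordsOf : List Char → List (List Char)
  | [] => []
  | c :: t =>
    if c = '/' then pvWordsOf t
    else (c :: t.takeWhile (· ≠ '/')) :: pvWordsOf (t.dropWhile (· ≠ '/'))
termination_by l => l.length
decreasing_by
  · simp
  · simpa using Nat.lt_succ_of_le (List.length_dropWhile_le _ _)

lemma pvWordsOf_cons_slash (t : List Char) : pvWordsOf ('/' :: t) = pvWordsOf t := by
  rw [pvWordsOf]; simp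

lemma pvWordsOf_cons_ne (c : Char) (t : List Char) (hc : ¬ c = '/') :
    pvWordsOf (c :: t)
      = (c :: t.takeWhile (· ≠ '/')) :: pvWordsOf (t.dropWhile (· ≠ '/')) := by
  rw [pvWordsOf]; simp [hc]

lemma head_dropWhile_ne_slash (t : List Char) (x : Char) (u : List Char)
    (hd : t.dropWhile (· ≠ '/') = x :: u) : x = '/' := by
  have := List.head_dropWhile_not (p := fun c => decide (c ≠ '/')) (l := t)
  simp only [hd] at this
  simpa using this (by simp)

def pvRest (l : List Char) : List (List Char) :=
  match l.dropWhile (· ≠ '/') with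
  | [] => []
  | _ :: u => pvSplitSl u

lemma pvRest_cons_slash (t : List Char) : pvRest ('/' :: t) = pvSplitSl t := by
  simp [pvRest]

lemma pvRest_cons_ne (c : Char) (t : List Char) (hc : ¬ c = '/') :
    pvRest (c :: t) = pvRest t := by
  simp [pvRest, hc]

lemma pvSplitSl_eq_take (l : List Char) :
    pvSplitSl l = l.takeWhile (· ≠ '/') :: pvRest l := by
  induction l with
  | nil => simp [pvSplitSl, pvRest]
  | cons c t ih =>
    by_cases hc : c = '/'
    · subst hc
      rw [pvSplitSl_cons_slash, pvRest_cons_slash]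
      simp
    · rw [pvSplitSl_cons_ne c t hc, pvRest_cons_ne c t hc, ih]
      simp [pvConsHead, hc]

lemma filter_pvSplitSl (cs : List Char) :
    (pvSplitSl cs).filter (fun p => decide (p ≠ [])) = pvWordsOf cs := by
  induction hn : cs.length using Nat.strong_induction_on generalizing cs with
  | _ n ih =>
  cases cs with
  | nil => simp [pvSplitSl, pvWordsOf]
  | cons c t =>
    by_cases hc : c = '/'
    · subst hc
      rw [pvSplitSl_cons_slash, pvWordsOf_cons_slash, List.filter_cons]
      rw [if_neg (by simp)]
      exact ih t.length (by simp [← hn]) t rfl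
    · rw [pvWordsOf_cons_ne c t hc]
      rw [pvSplitSl_eq_take (c :: t), List.filter_cons, if_pos (by simp [hc])]
      rw [pvRest_cons_ne c t hc]
      congr 1
      · simp [hc]
      · unfold pvRest
        cases hd : t.dropWhile (· ≠ '/') with
        | nil => simp [pvWordsOf]
        | cons x u =>
          have hx : x = '/' := head_dropWhile_ne_slash t x u hd
          have hlen : u.length < n := by
            have h1 : (x :: u).length ≤ t.length := by
              rw [← hd]; exact List.length_dropWhile_le _ _
            simp at h1
            simp [← hn]; omega
          rw [show pvWordsOf (x :: u) = pvWordsOf u from by rw [hx, pvWordsOf_cons_slash]]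
          exact ih u.length hlen u rfl

lemma pvWordsOf_eq_nil_iff (cs : List Char) :
    pvWordsOf cs = [] ↔ cs.dropWhile (· = '/') = [] := by
  induction cs with
  | nil => simp [pvWordsOf]
  | cons c t ih =>
    by_cases hc : c = '/'
    · subst hc; rw [pvWordsOf_cons_slash]; simp [ih]
    · rw [pvWordsOf_cons_ne c t hc]; simp [hc]

lemma pvWordsOf_dropWhile (cs : List Char) :
    pvWordsOf cs = pvWordsOf (cs.dropWhile (· = '/')) := by
  induction cs with
  | nil => simp
  | cons c t ih =>
    by_cases hc : c = '/'
    · subst hc; rw [pvWordsOf_cons_slash]; simpa [List.dropWhile_cons] using ih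
    · simp [hc]

lemma pvWordsOf_cons_of_ne (s : List Char) (hs : s.dropWhile (· = '/') = s) (hne : s ≠ []) :
    pvWordsOf s = s.takeWhile (· ≠ '/') :: pvWordsOf (s.dropWhile (· ≠ '/')) := by
  cases s with
  | nil => exact absurd rfl hne
  | cons c t =>
    have hc : ¬ c = '/' := by
      intro hcc; subst hcc
      rw [List.dropWhile_cons] at hs
      simp at hs
      have := List.length_dropWhile_le (fun c => decide (c = '/')) t
      rw [hs] at this; simp at this
    rw [pvWordsOf_cons_ne c t hc]
    simp [hc]

-- head of dropWhile (· ≠ '/') is '/', so "drop 1 then lstrip /" = "lstrip /"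
lemma drop_one_dropWhile_slash (t : List Char) :
    (((t.dropWhile (· ≠ '/')).drop 1).dropWhile (· = '/'))
      = (t.dropWhile (· ≠ '/')).dropWhile (· = '/') := by
  cases hd : t.dropWhile (· ≠ '/') with
  | nil => simp
  | cons x u =>
    have hx : x = '/' := head_dropWhile_ne_slash t x u hd
    simp [hx]

lemma nil_not_mem_pvMgmtWords : ¬ (([] : List Char) ∈ pvMgmtWords) := by decide

-- ===== VERDICT (by name: the statement is the Claim_ definition above) =====
theorem is_agent_mgmt_route_py_spec : Claim_equal_is_agent_mgmt_route_py := by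
  intro path _
  unfold Spec_is_agent_mgmt_route_py is_agent_mgmt_route_py is_agent_mgmt_route_py_alt
  simp only [splitOn_eq_pvSplitSl, filter_pvSplitSl]
  set cs := path.toList with hcs
  set s := cs.dropWhile (· = '/') with hs
  have hwords : pvWordsOf cs = pvWordsOf s := pvWordsOf_dropWhile cs
  by_cases hse : s = []
  · -- all slashes (or empty): first = [], words = []
    have hw : pvWordsOf cs = [] := by rw [hwords, hse]; simp [pvWordsOf]
    rw [hw]
    simp only [hse]
    cases hc0 : cs with
    | nil => simpa using nil_not_mem_pvMgmtWords
    | cons a b => simpa using nil_not_mem_pvMgmtWords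
  · have hsfix : s.dropWhile (· = '/') = s := by
      rw [hs, List.dropWhile_idempotent]
    have hw : pvWordsOf cs = s.takeWhile (· ≠ '/') :: pvWordsOf (s.dropWhile (· ≠ '/')) := by
      rw [hwords, pvWordsOf_cons_of_ne s hsfix hse]
    have hcse : cs ≠ [] := by
      intro hnil; apply hse; rw [hs, hnil]; simp
    rw [hw, if_neg hcse]
    by_cases hmem : s.takeWhile (· ≠ '/') ∈ pvMgmtWords
    · have hA : ¬ ¬ ((s.takeWhile (· ≠ '/') :: pvWordsOf (s.dropWhile (· ≠ '/'))).headD []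
          ∈ pvMgmtWords) := by
        rw [List.headD_cons]; exact not_not_intro hmem
      rw [if_neg hA, if_neg (not_not_intro hmem)]
      rw [if_neg (by simp : ¬ (s.takeWhile (· ≠ '/') :: pvWordsOf (s.dropWhile (· ≠ '/')) = []))]
      rw [drop_one_dropWhile_slash s]
      set d := s.dropWhile (· ≠ '/') with hd
      set r := d.dropWhile (· = '/') with hr
      by_cases hre : r = []
      · have hwd : pvWordsOf d = [] := by
          rw [pvWordsOf_dropWhile d, ← hr, hre]; simp [pvWordsOf]
        rw [hwd, hre]
        simp
      · have hrfix : r.dropWhile (· = '/') = r := by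
          rw [hr, List.dropWhile_idempotent]
        have hwd : pvWordsOf d = r.takeWhile (· ≠ '/') :: pvWordsOf (r.dropWhile (· ≠ '/')) :=
          by rw [pvWordsOf_dropWhile d, ← hr, pvWordsOf_cons_of_ne r hrfix hre]
        rw [hwd, drop_one_dropWhile_slash r]
        have hnil_iff := pvWordsOf_eq_nil_iff (r.dropWhile (· ≠ '/'))
        cases hwe : pvWordsOf (r.dropWhile (· ≠ '/')) with
        | nil =>
          have h0 : (r.dropWhile (· ≠ '/')).dropWhile (· = '/') = [] := hnil_iff.mp hwe
          rw [h0]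
          simp
        | cons w ws =>
          have h0 : (r.dropWhile (· ≠ '/')).dropWhile (· = '/') ≠ [] := by
            intro hnil
            have := hnil_iff.mpr hnil
            rw [hwe] at this; exact absurd this (by simp)
          rw [decide_eq_false (by simp), decide_eq_false h0]
    · have hA : ¬ ((s.takeWhile (· ≠ '/') :: pvWordsOf (s.dropWhile (· ≠ '/'))).headD []
          ∈ pvMgmtWords) := by
        rw [List.headD_cons]; exact hmem
      rw [if_neg (by simp : ¬ (s.takeWhile (· ≠ '/') :: pvWordsOf (s.dropWhile (· ≠ '/')) = []))]
      rw [if_pos hA, if_pos hmem]
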